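-- pv_equiv track=rewrite | github.com/ThomasLEBRET/Programmation_-tudes-sup | BTS-SIO/algorithme/1ère année/TP6-Matrices/exercice12.py | suite
-- ===== SOURCE A (Python) =====
-- def suite(mat):
--     K = [1,2,3,4,5,6,7,8,9]
--     L = []
--     for i in range(len(mat)):
--         for j in range(len(mat[i])):
--             L.append(mat[i][j])
--     dif = [item for item in K if item not in L]
--     inter = ([item for item in K if item not in dif])
--     for i in range(len(inter)):
--         if i+1 != inter[i]:
--             return False
--     return True
-- ===== SOURCE B (Python) =====
-- def suite(mat):
--     present = {v for row in mat for v in row if 1 <= v <= 9}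
--     return present == set(range(1, len(present) + 1))
-- ===== Notes on version B (the rewrite author's own statement) =====
-- stated objective: simpler
-- what changed: Replaces A's index-driven flatten, the K-minus-L complement list `dif`, its re-complement `inter` and the position-comparison loop by a single set comprehension of the in-range values and one set equality with the gap-free prefix {1..m}.
import Mathlib
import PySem

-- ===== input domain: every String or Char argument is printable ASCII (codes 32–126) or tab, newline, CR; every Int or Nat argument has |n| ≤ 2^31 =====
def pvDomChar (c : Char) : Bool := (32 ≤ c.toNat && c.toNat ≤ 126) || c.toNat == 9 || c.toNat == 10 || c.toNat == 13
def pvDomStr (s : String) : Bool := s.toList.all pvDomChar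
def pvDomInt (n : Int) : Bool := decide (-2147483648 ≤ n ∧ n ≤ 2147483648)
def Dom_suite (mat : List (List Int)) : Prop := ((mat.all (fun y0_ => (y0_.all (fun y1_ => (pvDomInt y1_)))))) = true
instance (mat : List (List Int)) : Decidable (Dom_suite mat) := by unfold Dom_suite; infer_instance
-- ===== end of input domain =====

-- B replaces A's flatten + double-complement (dif/inter) + index-comparison loop by one set
-- comprehension and a single set equality with {1..m}; objective: simpler, same behaviour.

-- ===== PORT A =====
-- the 'for i in range(len(inter)): if i+1 != inter[i]: return False / return True' loop
def suiteCheck : List Int → Int → Bool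
  | [], _ => true
  | x :: rest, i => if i + 1 ≠ x then false else suiteCheck rest (i + 1)

def suite (mat : List (List Int)) : Bool :=
  let K : List Int := [1,2,3,4,5,6,7,8,9]
  let L : List Int :=
    (PySem.List.pyRange 0 (mat.length : Int) 1).foldl (fun acc i =>
      let row := PySem.List.pyGetD mat i []
      (PySem.List.pyRange 0 (row.length : Int) 1).foldl (fun acc2 j =>
        acc2 ++ [PySem.List.pyGetD row j 0]) acc) []
  let dif := K.filter (fun item => !(L.contains item))
  let inter := K.filter (fun item => !(dif.contains item))
  suiteCheck inter 0

-- ===== PORT B =====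
def suite_alt (mat : List (List Int)) : Bool :=
  let present : PySem.Set Int :=
    PySem.Set.ofList ((mat.flatMap (fun row => row)).filter (fun v => decide (1 ≤ v) && decide (v ≤ 9)))
  PySem.Set.equal present (PySem.Set.ofList (PySem.List.pyRange 1 ((present.length : Int) + 1) 1))

-- ===== PRECONDITION & SPEC =====
def Spec_suite (mat : List (List Int)) (out : Bool) : Prop := out = suite_alt mat
instance (mat : List (List Int)) (out : Bool) : Decidable (Spec_suite mat out) := by unfold Spec_suite; infer_instance

-- ===== CLAIM (what is proved, stated in full; the proofs are below) =====
def Claim_equal_suite : Prop := ∀ (mat : List (List Int)), Dom_suite mat → Spec_suite mat (suite mat)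

-- ===== LEMMAS AND PROOFS =====

theorem mem_K_iff (x : Int) : x ∈ ([1,2,3,4,5,6,7,8,9] : List Int) ↔ 1 ≤ x ∧ x ≤ 9 := by
  simp only [List.mem_cons, List.not_mem_nil, or_false]
  omega

theorem foldl_append_singleton (row acc : List Int) :
    row.foldl (fun acc2 v => acc2 ++ [v]) acc = acc ++ row := by
  induction row generalizing acc with
  | nil => simp
  | cons v rest ih => simp [List.foldl_cons, ih]

theorem foldl_append_rows (mat : List (List Int)) (acc : List Int) :
    mat.foldl (fun a r => a ++ r) acc = acc ++ mat.flatten := by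
  induction mat generalizing acc with
  | nil => simp
  | cons r rest ih => simp [List.foldl_cons, ih]

theorem suiteCheck_iff (xs : List Int) (n : Int) :
    suiteCheck xs n = true ↔ xs = PySem.List.pyRange (n+1) (n+1+xs.length) 1 := by
  induction xs generalizing n with
  | nil =>
    simp only [List.length_nil, Nat.cast_zero, add_zero]
    rw [PySem.List.pyRange_one_eq_nil (le_refl _)]
    simp [suiteCheck]
  | cons x rest ih =>
    have hb : (n+1 : Int) < n+1+(((x::rest).length : Nat) : Int) := by
      simp only [List.length_cons]; push_cast; omega
    rw [PySem.List.pyRange_one_cons hb]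
    have hbnd : (n + 1 + (((x::rest).length : Nat) : Int)) = (n + 1) + 1 + ((rest.length : Nat) : Int) := by
      simp only [List.length_cons]; push_cast; ring
    rw [hbnd]
    simp only [suiteCheck, List.cons_eq_cons]
    by_cases hx : n + 1 = x
    · subst hx
      simp [ih (n+1)]
    · rw [if_pos hx]
      constructor
      · intro h; cases h
      · rintro ⟨h, -⟩; exact absurd h.symm hx

theorem pairwise_lt_filter (p : Int → Bool) :
    (([1,2,3,4,5,6,7,8,9] : List Int).filter p).Pairwise (· < ·) :=
  List.Pairwise.filter p (by decide)

theorem suite_eq (mat : List (List Int)) :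
    suite mat = suiteCheck (([1,2,3,4,5,6,7,8,9]:List Int).filter (fun x => mat.flatten.contains x)) 0 := by
  unfold suite
  have hL : (PySem.List.pyRange 0 (mat.length : Int) 1).foldl (fun acc i =>
      let row := PySem.List.pyGetD mat i []
      (PySem.List.pyRange 0 (row.length : Int) 1).foldl (fun acc2 j =>
        acc2 ++ [PySem.List.pyGetD row j 0]) acc) [] = mat.flatten := by
    rw [PySem.List.foldl_pyRange_zero_pyGetD' mat ([]:List Int)
      (fun acc row => (PySem.List.pyRange 0 (row.length : Int) 1).foldl (fun acc2 j =>
        acc2 ++ [PySem.List.pyGetD row j 0]) acc) ([]:List Int)]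
    have hrow : ∀ (acc row : List Int),
        (PySem.List.pyRange 0 (row.length : Int) 1).foldl (fun acc2 j => acc2 ++ [PySem.List.pyGetD row j 0]) acc = acc ++ row := by
      intro acc row
      rw [PySem.List.foldl_pyRange_zero_pyGetD' row (0:Int) (fun a v => a ++ [v]) acc]
      exact foldl_append_singleton row acc
    simp only [hrow]
    simpa using foldl_append_rows mat []
  rw [hL]
  show suiteCheck (([1,2,3,4,5,6,7,8,9]:List Int).filter (fun item =>
      !((([1,2,3,4,5,6,7,8,9]:List Int).filter (fun it => !(mat.flatten.contains it))).contains item))) 0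
    = suiteCheck (([1,2,3,4,5,6,7,8,9]:List Int).filter (fun x => mat.flatten.contains x)) 0
  congr 1
  apply List.filter_congr
  intro x hx
  rw [Bool.eq_iff_iff]
  simp [List.mem_filter, hx]

theorem suite_alt_eq (mat : List (List Int)) :
    suite_alt mat = PySem.Set.equal (PySem.Set.ofList ((mat.flatten).filter (fun v => decide (1 ≤ v) && decide (v ≤ 9))))
      (PySem.Set.ofList (PySem.List.pyRange 1 (((PySem.Set.ofList ((mat.flatten).filter (fun v => decide (1 ≤ v) && decide (v ≤ 9)))).length : Int) + 1) 1)) := by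
  simp only [suite_alt, List.flatMap_id']

theorem suite_spec : Claim_equal_suite := by
  intro mat _
  show suite mat = suite_alt mat
  rw [suite_eq, suite_alt_eq]
  set F := mat.flatten with hF
  set inter := (([1,2,3,4,5,6,7,8,9]:List Int).filter (fun x => F.contains x)) with hinter
  set present := PySem.Set.ofList (F.filter (fun v => decide (1 ≤ v) && decide (v ≤ 9))) with hpres
  have hmem : ∀ y, y ∈ present ↔ y ∈ inter := by
    intro y
    rw [hpres, hinter]
    simp only [PySem.Set.mem_ofList, List.mem_filter, Bool.and_eq_true, decide_eq_true_eq,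
      List.contains_iff_mem, mem_K_iff]
    tauto
  have hnodupI : inter.Nodup := List.Nodup.filter _ (by decide)
  have hperm : present.Perm inter :=
    (List.perm_ext_iff_of_nodup (PySem.Set.nodup_ofList _) hnodupI).mpr hmem
  have hlen : present.length = inter.length := hperm.length_eq
  rw [Bool.eq_iff_iff, suiteCheck_iff, PySem.Set.equal_iff, hlen]
  have hb : (0 : Int) + 1 + (inter.length : Int) = (inter.length : Int) + 1 := by ring
  rw [hb]
  constructor
  · intro h x
    refine (hmem x).trans ?_
    rw [h]
    norm_num [PySem.Set.mem_ofList]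
  · intro h
    have hperm2 : inter.Perm (PySem.List.pyRange 1 ((inter.length : Int) + 1) 1) := by
      refine (List.perm_ext_iff_of_nodup hnodupI (PySem.List.nodup_pyRange_one _ _)).mpr ?_
      intro y
      exact ((hmem y).symm.trans (h y)).trans (PySem.Set.mem_ofList _ _)
    have hs1 : inter.Pairwise (· ≤ ·) := (pairwise_lt_filter _).imp le_of_lt
    have hs2 : (PySem.List.pyRange 1 ((inter.length : Int) + 1) 1).Pairwise (· ≤ ·) :=
      (PySem.List.pairwise_lt_pyRange_one _ _).imp le_of_lt
    exact List.Perm.eq_of_pairwise (fun a b _ _ h1 h2 => le_antisymm h1 h2) hs1 hs2 hperm2
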